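-- pv_equiv track=rewrite | github.com/suzyrhkr/Algorithm-PS | programmers/level1/키패드누르기.py | solution
-- ===== SOURCE A (Python) =====
-- def num_index(phone, number):
--     for row in range(len(phone)):
--         for col in range(len(phone[row])):
--             if number == phone[row][col]:
--                 return row, col
--
-- def solution(numbers, hand):
--     answer = ''
--     phone = [[1,2,3], [4,5,6], [7,8,9], ['*',0,'#']]
--     left_num, right_num = '*', '#'
--
--     for num in numbers:
--         if num in [1, 4, 7]:
--             answer += 'L'
--             left_num = num
--
--         elif num in [3, 6, 9]:
--             answer += 'R'
--             right_num = num
--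
--         elif num in [2, 5, 8, 0]:
--             left_row, left_col = num_index(phone, left_num)
--             right_row, right_col = num_index(phone, right_num)
--             num_row, num_col = num_index(phone, num)
--
--             left_distance = abs(left_row - num_row) + abs(left_col - num_col)
--             right_distance = abs(right_row - num_row) + abs(right_col - num_col)
--
--             if left_distance < right_distance:
--                 answer += 'L'
--                 left_num = num
--
--             elif right_distance < left_distance:
--                 answer += 'R'
--                 right_num = num
--
--             else:
--                 if hand=='right':
--                     answer += 'R'
--                     right_num = num
--                 else:
--                     answer += 'L'
--                     left_num = num
--
--     return answer
-- ===== SOURCE B (Python) =====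
-- def solution(numbers, hand):
--     # Table-driven: precompute a finite transition table over all reachable
--     # (left-pos, right-pos, middle-digit) states once; the main loop is pure lookup.
--     POS = {n: divmod(n - 1, 3) for n in range(1, 10)}
--     POS[0] = (3, 1)
--     lstart, rstart = (3, 0), (3, 2)   # '*' and '#'
--     T = {}
--     for lp in [lstart] + [POS[d] for d in (1, 4, 7, 2, 5, 8, 0)]:
--         for rp in [rstart] + [POS[d] for d in (3, 6, 9, 2, 5, 8, 0)]:
--             for n in (2, 5, 8, 0):
--                 p = POS[n]
--                 ld = abs(lp[0] - p[0]) + abs(lp[1] - p[1])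
--                 rd = abs(rp[0] - p[0]) + abs(rp[1] - p[1])
--                 T[lp, rp, n] = 'L' if ld < rd else 'R' if rd < ld else 'T'
--     out = []
--     l, r = lstart, rstart
--     for num in numbers:
--         if num in (1, 4, 7):
--             ch = 'L'
--         elif num in (3, 6, 9):
--             ch = 'R'
--         elif num in (2, 5, 8, 0):
--             ch = T[l, r, num]
--             if ch == 'T':
--                 ch = 'R' if hand == 'right' else 'L'
--         else:
--             continue
--         out.append(ch)
--         if ch == 'L':
--             l = POS[num]
--         else:
--             r = POS[num]
--     return ''.join(out)
-- ===== Notes on version B (the rewrite author's own statement) =====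
-- stated objective: alternative
-- what changed: B precomputes a finite transition table (dict keyed by left/right hand coordinates and the middle digit, decision 'L'/'R'/'T') over all reachable hand states once, so the main loop is a pure table lookup with no grid scanning or distance arithmetic; A scans a 4x3 grid per press and compares distances online.
import Mathlib
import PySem

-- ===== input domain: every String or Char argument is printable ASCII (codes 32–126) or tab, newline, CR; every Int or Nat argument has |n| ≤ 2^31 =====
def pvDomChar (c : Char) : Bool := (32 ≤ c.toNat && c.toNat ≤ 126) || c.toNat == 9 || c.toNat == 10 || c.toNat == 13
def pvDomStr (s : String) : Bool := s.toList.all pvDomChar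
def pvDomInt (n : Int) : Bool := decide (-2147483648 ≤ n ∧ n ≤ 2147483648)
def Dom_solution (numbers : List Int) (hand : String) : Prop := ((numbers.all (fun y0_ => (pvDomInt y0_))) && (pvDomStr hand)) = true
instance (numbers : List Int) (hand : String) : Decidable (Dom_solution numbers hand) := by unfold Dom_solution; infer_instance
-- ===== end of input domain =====

-- B precomputes a finite transition table over all reachable hand states, so its main loop
-- is a pure table lookup; A scans the grid and compares distances online (objective: alternative).

-- ===== PORT A =====
-- keypad cell: an int key, '*' or '#' (Python's heterogeneous grid entries)
inductive Cell
  | num : Int → Cell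
  | star : Cell
  | hash : Cell
deriving DecidableEq, Repr

-- phone = [[1,2,3],[4,5,6],[7,8,9],['*',0,'#']]
def phoneA : List (List Cell) :=
  [[.num 1, .num 2, .num 3], [.num 4, .num 5, .num 6],
   [.num 7, .num 8, .num 9], [.star, .num 0, .hash]]

-- inner loop of num_index: 'for col in range(len(phone[row])): if number == phone[row][col]: return row, col'
def numIndexCols : List Cell → Cell → Int → Option Int
  | [], _, _ => none
  | c :: cs, x, i => if x = c then some i else numIndexCols cs x (i + 1)

-- outer loop of num_index over rows; none = Python's implicit 'return None'
def numIndexRows : List (List Cell) → Cell → Int → Option (Int × Int)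
  | [], _, _ => none
  | r :: rs, x, i =>
    match numIndexCols r x 0 with
    | some j => some (i, j)
    | none => numIndexRows rs x (i + 1)

-- the 'for num in numbers' loop of A, carrying (answer, left_num, right_num)
def solGoA : List Int → String → String → Cell → Cell → String
  | [], _, answer, _, _ => answer
  | num :: rest, hand, answer, leftN, rightN =>
    if num ∈ ([1, 4, 7] : List Int) then
      solGoA rest hand (answer ++ "L") (.num num) rightN
    else if num ∈ ([3, 6, 9] : List Int) then
      solGoA rest hand (answer ++ "R") leftN (.num num)
    else if num ∈ ([2, 5, 8, 0] : List Int) then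
      -- unpacking: num_index never returns None here (left_num/right_num/num are on the phone);
      -- the .getD (0,0) default is unreachable
      let lrc := (numIndexRows phoneA leftN 0).getD (0, 0)
      let rrc := (numIndexRows phoneA rightN 0).getD (0, 0)
      let nrc := (numIndexRows phoneA (.num num) 0).getD (0, 0)
      let ld := |lrc.1 - nrc.1| + |lrc.2 - nrc.2|
      let rd := |rrc.1 - nrc.1| + |rrc.2 - nrc.2|
      if ld < rd then solGoA rest hand (answer ++ "L") (.num num) rightN
      else if rd < ld then solGoA rest hand (answer ++ "R") leftN (.num num)
      else if hand = "right" then solGoA rest hand (answer ++ "R") leftN (.num num)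
      else solGoA rest hand (answer ++ "L") (.num num) rightN
    else solGoA rest hand answer leftN rightN

def solution (numbers : List Int) (hand : String) : String :=
  solGoA numbers hand "" .star .hash

-- ===== PORT B =====
-- POS = {n: divmod(n - 1, 3) for n in range(1, 10)}; POS[0] = (3, 1)
def posDictB : PySem.Dict Int (Int × Int) :=
  ((PySem.List.pyRange 1 10 1).foldl
    (fun d n => d.insert n (PySem.Int.floordiv (n - 1) 3, PySem.Int.mod (n - 1) 3))
    PySem.Dict.empty).insert 0 (3, 1)

-- POS[d]; the .getD (0,0) default is unreachable (every looked-up digit is a key)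
def posOfB (d : Int) : Int × Int := (posDictB.get? d).getD (0, 0)

-- [lstart] + [POS[d] for d in (1,4,7,2,5,8,0)]  /  [rstart] + [POS[d] for d in (3,6,9,2,5,8,0)]
def lcellsB : List (Int × Int) := (3, 0) :: ([1, 4, 7, 2, 5, 8, 0] : List Int).map posOfB
def rcellsB : List (Int × Int) := (3, 2) :: ([3, 6, 9, 2, 5, 8, 0] : List Int).map posOfB

-- the triple loop building T
def tableB : PySem.Dict ((Int × Int) × (Int × Int) × Int) String :=
  lcellsB.foldl (fun T0 lp =>
    rcellsB.foldl (fun T1 rp =>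
      ([2, 5, 8, 0] : List Int).foldl (fun T2 n =>
        let p := posOfB n
        let ld := |lp.1 - p.1| + |lp.2 - p.2|
        let rd := |rp.1 - p.1| + |rp.2 - p.2|
        T2.insert (lp, rp, n) (if ld < rd then "L" else if rd < ld then "R" else "T"))
        T1) T0) PySem.Dict.empty

-- the 'for num in numbers' loop of B; ch? = none models 'continue'
def solGoB : List Int → String → List String → Int × Int → Int × Int → List String
  | [], _, out, _, _ => out
  | num :: rest, hand, out, l, r =>
    let ch? : Option String :=
      if num ∈ ([1, 4, 7] : List Int) then some "L"
      else if num ∈ ([3, 6, 9] : List Int) then some "R"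
      else if num ∈ ([2, 5, 8, 0] : List Int) then
        -- T[l, r, num]; the .getD "T" default is unreachable (the key is always present)
        let ch := (tableB.get? (l, r, num)).getD "T"
        some (if ch = "T" then (if hand = "right" then "R" else "L") else ch)
      else none
    match ch? with
    | none => solGoB rest hand out l r
    | some ch =>
      if ch = "L" then solGoB rest hand (out ++ [ch]) (posOfB num) r
      else solGoB rest hand (out ++ [ch]) l (posOfB num)

def solution_alt (numbers : List Int) (hand : String) : String :=
  PySem.Str.join "" (solGoB numbers hand [] (3, 0) (3, 2))

-- ===== PRECONDITION & SPEC =====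
def Spec_solution (numbers : List Int) (hand : String) (out : String) : Prop := out = solution_alt numbers hand
instance (numbers : List Int) (hand : String) (out : String) : Decidable (Spec_solution numbers hand out) := by unfold Spec_solution; infer_instance

-- ===== CLAIM (what is proved, stated in full; the proofs are below) =====
def Claim_equal_solution : Prop := ∀ (numbers : List Int) (hand : String), Dom_solution numbers hand → Spec_solution numbers hand (solution numbers hand)

-- ===== LEMMAS AND PROOFS =====

theorem join_empty_nil : PySem.Str.join "" ([] : List String) = "" := by decide

theorem join_empty_cons (a : String) (l : List String) :
    PySem.Str.join "" (a :: l) = a ++ PySem.Str.join "" l := by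
  have h : (PySem.Str.join "" (a :: l)).toList = (a ++ PySem.Str.join "" l).toList := by
    simp [PySem.Str.join, PySem.Chars.join, List.intercalate]
    cases l <;> simp
  exact String.toList_inj.mp h

-- the accumulator of B's loop is a pure prefix
theorem solGoB_acc (numbers : List Int) (hand : String) (out : List String) (l r : Int × Int) :
    solGoB numbers hand out l r = out ++ solGoB numbers hand [] l r := by
  induction numbers generalizing out l r with
  | nil => simp [solGoB]
  | cons num rest ih =>
    simp only [solGoB]
    by_cases h1 : num ∈ ([1, 4, 7] : List Int)
    · simp only [if_pos h1]
      conv_rhs => rw [ih]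
      rw [ih]
      simp
    · by_cases h2 : num ∈ ([3, 6, 9] : List Int)
      · simp only [if_neg h1, if_pos h2]
        split_ifs
        · conv_rhs => rw [ih]
          rw [ih]; simp
        · conv_rhs => rw [ih]
          rw [ih]; simp
      · by_cases h3 : num ∈ ([2, 5, 8, 0] : List Int)
        · simp only [if_neg h1, if_neg h2, if_pos h3]
          split_ifs <;> (conv_rhs => rw [ih]) <;> rw [ih] <;> simp
        · simp only [if_neg h1, if_neg h2, if_neg h3]
          exact ih out l r

-- the positions A's grid scan finds, and that hand updates stay inside the table's state space
def digitsL : List Int := [1, 4, 7, 2, 5, 8, 0]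
def digitsR : List Int := [3, 6, 9, 2, 5, 8, 0]

set_option maxRecDepth 40000

theorem factL : ∀ n ∈ digitsL, posOfB n ∈ lcellsB ∧ numIndexRows phoneA (.num n) 0 = some (posOfB n) := by decide
theorem factR : ∀ n ∈ digitsR, posOfB n ∈ rcellsB ∧ numIndexRows phoneA (.num n) 0 = some (posOfB n) := by decide

-- the precomputed table returns exactly the online distance decision
theorem table_spec : ∀ lp ∈ lcellsB, ∀ rp ∈ rcellsB, ∀ n ∈ ([2, 5, 8, 0] : List Int),
    (tableB.get? (lp, rp, n)).getD "T" =
      (if |lp.1 - (posOfB n).1| + |lp.2 - (posOfB n).2| < |rp.1 - (posOfB n).1| + |rp.2 - (posOfB n).2| then "L"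
       else if |rp.1 - (posOfB n).1| + |rp.2 - (posOfB n).2| < |lp.1 - (posOfB n).1| + |lp.2 - (posOfB n).2| then "R"
       else "T") := by decide

theorem solGo_eq (numbers : List Int) (hand answer : String) (leftN rightN : Cell)
    (lp rp : Int × Int)
    (hL : numIndexRows phoneA leftN 0 = some lp) (hLm : lp ∈ lcellsB)
    (hR : numIndexRows phoneA rightN 0 = some rp) (hRm : rp ∈ rcellsB) :
    solGoA numbers hand answer leftN rightN =
      answer ++ PySem.Str.join "" (solGoB numbers hand [] lp rp) := by
  induction numbers generalizing answer leftN rightN lp rp with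
  | nil => simp [solGoA, solGoB, join_empty_nil]
  | cons num rest ih =>
    by_cases h1 : num ∈ ([1, 4, 7] : List Int)
    · have h1' : num = 1 ∨ num = 4 ∨ num = 7 := by simpa using h1
      have hnum : num ∈ digitsL := by rcases h1' with h | h | h <;> subst h <;> decide
      obtain ⟨hm, hn⟩ := factL num hnum
      have hstep : solGoB (num :: rest) hand [] lp rp = "L" :: solGoB rest hand [] (posOfB num) rp := by
        simp only [solGoB, if_pos h1]
        simp
        all_goals ((conv_lhs => rw [solGoB_acc]); simp; try rfl)
      simp only [solGoA, if_pos h1]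
      rw [ih _ _ _ _ _ hn hm hR hRm, hstep, join_empty_cons, ← String.append_assoc]
    · by_cases h2 : num ∈ ([3, 6, 9] : List Int)
      · have h2' : num = 3 ∨ num = 6 ∨ num = 9 := by simpa using h2
        have hnum : num ∈ digitsR := by rcases h2' with h | h | h <;> subst h <;> decide
        obtain ⟨hm, hn⟩ := factR num hnum
        have hstep : solGoB (num :: rest) hand [] lp rp = "R" :: solGoB rest hand [] lp (posOfB num) := by
          simp only [solGoB, if_neg h1, if_pos h2]
          simp
          all_goals ((conv_lhs => rw [solGoB_acc]); simp; try rfl)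
        simp only [solGoA, if_neg h1, if_pos h2]
        rw [ih _ _ _ _ _ hL hLm hn hm, hstep, join_empty_cons, ← String.append_assoc]
      · by_cases h3 : num ∈ ([2, 5, 8, 0] : List Int)
        · have h3' : num = 2 ∨ num = 5 ∨ num = 8 ∨ num = 0 := by simpa using h3
          have hnumL : num ∈ digitsL := by rcases h3' with h | h | h | h <;> subst h <;> decide
          have hnumR : num ∈ digitsR := by rcases h3' with h | h | h | h <;> subst h <;> decide
          obtain ⟨hmL, hn⟩ := factL num hnumL
          obtain ⟨hmR, -⟩ := factR num hnumR
          have htab := table_spec lp hLm rp hRm num h3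
          simp only [solGoA, if_neg h1, if_neg h2, if_pos h3, hL, hR, hn, Option.getD_some]
          set p := posOfB num with hp
          set ld := |lp.1 - p.1| + |lp.2 - p.2| with hld
          set rd := |rp.1 - p.1| + |rp.2 - p.2| with hrd
          by_cases hlt : ld < rd
          · have hstep : solGoB (num :: rest) hand [] lp rp = "L" :: solGoB rest hand [] p rp := by
              simp only [solGoB, if_neg h1, if_neg h2, if_pos h3, htab, if_pos hlt]
              simp
              all_goals ((conv_lhs => rw [solGoB_acc]); simp; try rfl)
            rw [if_pos hlt, ih _ _ _ _ _ hn hmL hR hRm, hstep, join_empty_cons, ← String.append_assoc]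
          · by_cases hgt : rd < ld
            · have hstep : solGoB (num :: rest) hand [] lp rp = "R" :: solGoB rest hand [] lp p := by
                simp only [solGoB, if_neg h1, if_neg h2, if_pos h3, htab, if_neg hlt, if_pos hgt]
                simp
                all_goals ((conv_lhs => rw [solGoB_acc]); simp; try rfl)
              rw [if_neg hlt, if_pos hgt, ih _ _ _ _ _ hL hLm hn hmR, hstep, join_empty_cons,
                ← String.append_assoc]
            · by_cases hh : hand = "right"
              · have hstep : solGoB (num :: rest) hand [] lp rp = "R" :: solGoB rest hand [] lp p := by
                  simp only [solGoB, if_neg h1, if_neg h2, if_pos h3, htab, if_neg hlt, if_neg hgt,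
                    if_pos hh]
                  simp
                  all_goals ((conv_lhs => rw [solGoB_acc]); simp; try rfl)
                rw [if_neg hlt, if_neg hgt, if_pos hh, ih _ _ _ _ _ hL hLm hn hmR, hstep,
                  join_empty_cons, ← String.append_assoc]
              · have hstep : solGoB (num :: rest) hand [] lp rp = "L" :: solGoB rest hand [] p rp := by
                  simp only [solGoB, if_neg h1, if_neg h2, if_pos h3, htab, if_neg hlt, if_neg hgt,
                    if_neg hh]
                  simp
                  all_goals ((conv_lhs => rw [solGoB_acc]); simp; try rfl)
                rw [if_neg hlt, if_neg hgt, if_neg hh, ih _ _ _ _ _ hn hmL hR hRm, hstep,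
                  join_empty_cons, ← String.append_assoc]
        · have hstep : solGoB (num :: rest) hand [] lp rp = solGoB rest hand [] lp rp := by
            simp only [solGoB, if_neg h1, if_neg h2, if_neg h3]
          simp only [solGoA, if_neg h1, if_neg h2, if_neg h3]
          rw [ih _ _ _ _ _ hL hLm hR hRm, hstep]

-- ===== VERDICT (by name: the statement is the Claim_ definition above) =====
theorem solution_spec : Claim_equal_solution := by
  intro numbers hand _
  unfold Spec_solution solution solution_alt
  rw [solGo_eq numbers hand "" .star .hash (3, 0) (3, 2) (by decide) (by decide) (by decide) (by decide)]
  simp
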